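-- pv_equiv track=rewrite | github.com/LaplaceFox/project-euler | pe230.py | dthDigit
-- ===== SOURCE A (Python) =====
-- fibdict = {1:1, 2:1}
--
-- def fib(n):
-- 	if n <= 2:
-- 		return 1
--
-- 	if n not in fibdict.keys():
-- 		fibdict[n] = fib(n-1) + fib(n-2)
-- 	return fibdict[n]
--
-- def fibWordLookup(k,i):
-- 	# Look up kth character (1-indexed) of ith Fibonacci word
-- 	if i <= 2:
-- 		return i # Return whether the character is A (1) or B (2)
--
-- 	if k <= fib(i-2):
-- 		return fibWordLookup(k,i-2)
-- 	else:
-- 		return fibWordLookup(k-fib(i-2),i-1)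
--
-- def dthDigit(n):
-- 	a = "1415926535897932384626433832795028841971693993751058209749445923078164062862089986280348253421170679"
-- 	b = "8214808651328230664709384460955058223172535940812848111745028410270193852110555964462294895493038196"
--
-- 	#a = "1415926535"
-- 	#b = "8979323846"
--
-- 	k = len(a)
-- 	assert(k == len(b)) # Lengths must be the same
--
-- 	rem = (n-1) % k # digit to look up in strings A or B
-- 	n = (n-1) // k + 1
--
-- 	i = 1
-- 	while fib(i) < n:
-- 		i += 1
--
-- 	res = fibWordLookup(n,i)
--
-- 	if res == 1:
-- 		return a[rem]
-- 	else:
-- 		return b[rem]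
-- ===== SOURCE B (Python) =====
-- def dthDigit(n):
--     a = "1415926535897932384626433832795028841971693993751058209749445923078164062862089986280348253421170679"
--     b = "8214808651328230664709384460955058223172535940812848111745028410270193852110555964462294895493038196"
--
--     rem = (n - 1) % 100          # digit position inside string A or B
--     m = (n - 1) // 100 + 1       # 1-based index into the infinite Fibonacci word
--
--     # ascending Fibonacci table: fibs[t] = fib(t+1); grow until the last entry >= m
--     fibs = [1, 1]
--     x, y = 1, 1
--     while y < m:
--         x, y = y, x + y
--         fibs.append(y)
--
--     # smallest word index i with fib(i) >= m
--     i = 1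
--     while fibs[i - 1] < m:
--         i += 1
--
--     # iterative descent through the Fibonacci-word structure
--     k = m
--     while i > 2:
--         f = fibs[i - 3]          # fib(i - 2)
--         if k <= f:
--             i -= 2
--         else:
--             k -= f
--             i -= 1
--
--     return a[rem] if i == 1 else b[rem]
-- ===== Notes on version B (the rewrite author's own statement) =====
-- stated objective: alternative
-- what changed: Replaced the memoized recursive fib plus the doubly-recursive fibWordLookup by a single ascending Fibonacci table built once, a scan of that table for the word index, and an iterative (loop, not recursion) descent through the Fibonacci-word structure.
import Mathlib
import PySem

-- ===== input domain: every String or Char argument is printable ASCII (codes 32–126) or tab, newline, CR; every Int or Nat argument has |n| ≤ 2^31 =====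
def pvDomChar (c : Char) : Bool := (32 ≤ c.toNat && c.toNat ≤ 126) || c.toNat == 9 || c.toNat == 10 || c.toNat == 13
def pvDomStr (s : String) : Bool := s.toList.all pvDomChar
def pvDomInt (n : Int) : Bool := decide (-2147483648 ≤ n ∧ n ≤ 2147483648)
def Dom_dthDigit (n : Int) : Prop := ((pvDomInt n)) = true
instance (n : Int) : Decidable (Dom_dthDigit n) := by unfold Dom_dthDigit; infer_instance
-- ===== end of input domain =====

-- B replaces A's memoized double recursion (fib + recursive fibWordLookup) by one ascending
-- Fibonacci table built once plus an iterative descent over word indices; same return value.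
-- (Python A memoizes in a module-level dict; port A threads a per-call dict — values unchanged.
--  The unbounded Python while-loops are ported with an explicit fuel that is proved sufficient
--  below: on every input the fuel-0 branch coincides with the loop's exit branch.)

-- ===== PORT A =====

-- Python's fib, its module-level memo dict threaded through explicitly; fuel ≥ n.toNat, and at
-- fuel 0 necessarily n ≤ 2, so the fuel-0 branch is the Python base case.
def fibAF : Nat → Int → PySem.Dict Int Int → Int × PySem.Dict Int Int
  | 0, _, d => (1, d)
  | fuel + 1, n, d =>
    if n ≤ 2 then (1, d)
    else
      match d.get? n with
      | some v => (v, d)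
      | none =>
        let p1 := fibAF fuel (n - 1) d
        let p2 := fibAF fuel (n - 2) p1.2
        let d' := p2.2.insert n (p1.1 + p2.1)
        (d'.getD n 0, d')

def fibA (n : Int) (d : PySem.Dict Int Int) : Int × PySem.Dict Int Int := fibAF n.toNat n d

-- "i = 1; while fib(i) < n: i += 1"; at fuel 0 it holds that i > nv ≤ fib(i) (proved below),
-- so the fuel-0 branch is the loop's exit branch.
def findIF : Nat → Int → Int → PySem.Dict Int Int → Int × PySem.Dict Int Int
  | 0, _, i, d => (i, (fibA i d).2)
  | fuel + 1, nv, i, d =>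
    if (fibA i d).1 < nv then findIF fuel nv (i + 1) (fibA i d).2
    else (i, (fibA i d).2)

-- Python's fibWordLookup; fuel ≥ i.toNat, so at fuel 0 we have i ≤ 0 ≤ 2: the Python base case
-- (fib(i-2) is evaluated a second time in the else branch, exactly as in the source).
def fwlF : Nat → Int → Int → PySem.Dict Int Int → Int × PySem.Dict Int Int
  | 0, _, i, d => (i, d)
  | fuel + 1, k, i, d =>
    if i ≤ 2 then (i, d)
    else
      let p := fibA (i - 2) d
      if k ≤ p.1 then fwlF fuel k (i - 2) p.2
      else
        let q := fibA (i - 2) p.2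
        fwlF fuel (k - q.1) (i - 1) q.2

-- The initial fibdict = {1: 1, 2: 1}.
def fibDict0 : PySem.Dict Int Int := (PySem.Dict.empty.insert 1 1).insert 2 1

def dthDigit (n : Int) : String :=
  let a := "1415926535897932384626433832795028841971693993751058209749445923078164062862089986280348253421170679"
  let b := "8214808651328230664709384460955058223172535940812848111745028410270193852110555964462294895493038196"
  let kk : Int := PySem.Str.len a
  -- assert(k == len(b)) holds: both literals have 100 characters
  let rem := PySem.Int.mod (n - 1) kk
  let n' := PySem.Int.floordiv (n - 1) kk + 1
  let r := findIF n'.toNat n' 1 fibDict0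
  let res := (fwlF r.1.toNat n' r.1 r.2).1
  if res = 1 then
    match PySem.Str.pyGet? a rem with | some c => String.ofList [c] | none => ""
  else
    match PySem.Str.pyGet? b rem with | some c => String.ofList [c] | none => ""

-- ===== PORT B =====

-- "while y < m: x, y = y, x + y; fibs.append(y)"; fuel ≥ (m - y).toNat, so at fuel 0 the guard
-- y < m is false: the fuel-0 branch is the loop's exit branch.
def growBF : Nat → Int → Int → Int → List Int → List Int
  | 0, _, _, _, acc => acc
  | fuel + 1, m, x, y, acc =>
    if y < m then growBF fuel m y (x + y) (acc ++ [x + y]) else acc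

-- "i = 1; while fibs[i-1] < m: i += 1", as structural recursion on the list suffix from i-1.
def scanB (m : Int) : List Int → Int → Int
  | [], i => i
  | f :: rest, i => if f < m then scanB m rest (i + 1) else i

-- "while i > 2: f = fibs[i-3]; if k <= f: i -= 2 else: k -= f; i -= 1"; fuel ≥ i.toNat, so at
-- fuel 0 we have i ≤ 0: the loop guard is false (index i-3 is always in range, proved below).
def descendBF (fibs : List Int) : Nat → Int → Int → Int
  | 0, _, i => i
  | fuel + 1, k, i =>
    if 2 < i then
      let f := PySem.List.pyGetD fibs (i - 3) 0
      if k ≤ f then descendBF fibs fuel k (i - 2) else descendBF fibs fuel (k - f) (i - 1)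
    else i

def dthDigit_alt (n : Int) : String :=
  let a := "1415926535897932384626433832795028841971693993751058209749445923078164062862089986280348253421170679"
  let b := "8214808651328230664709384460955058223172535940812848111745028410270193852110555964462294895493038196"
  let rem := PySem.Int.mod (n - 1) 100
  let m := PySem.Int.floordiv (n - 1) 100 + 1
  let fibs := growBF (m - 1).toNat m 1 1 [1, 1]
  let i0 := scanB m fibs 1
  let res := descendBF fibs i0.toNat m i0
  if res = 1 then ((PySem.Str.pyGet? a rem).map (fun c => String.ofList [c])).getD ""
  else ((PySem.Str.pyGet? b rem).map (fun c => String.ofList [c])).getD ""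

-- ===== PRECONDITION & SPEC =====
def Spec_dthDigit (n : Int) (out : String) : Prop := out = dthDigit_alt n
instance (n : Int) (out : String) : Decidable (Spec_dthDigit n out) := by unfold Spec_dthDigit; infer_instance

-- ===== CLAIM (what is proved, stated in full; the proofs are below) =====
def Claim_equal_dthDigit : Prop := ∀ (n : Int), Dom_dthDigit n → Spec_dthDigit n (dthDigit n)

-- ===== LEMMAS AND PROOFS =====

-- Mathematical value of Python's fib(n), and pure versions of the two loops.

def fibSpec (n : Int) : Int :=
  if n ≤ 2 then 1 else fibSpec (n - 1) + fibSpec (n - 2)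
termination_by n.toNat
decreasing_by all_goals omega

theorem fibSpec_pos : ∀ (n : Int), 1 ≤ fibSpec n := by
  intro n
  induction hN : n.toNat using Nat.strong_induction_on generalizing n with
  | _ N ih =>
    rw [fibSpec]
    split
    · omega
    · rename_i h
      have h1 := ih (n - 1).toNat (by omega) (n - 1) rfl
      have h2 := ih (n - 2).toNat (by omega) (n - 2) rfl
      omega

theorem fibSpec_ge (n : Int) : n - 1 ≤ fibSpec n := by
  rw [fibSpec]
  split
  · omega
  · have h1 := fibSpec_ge (n - 1)
    have h2 := fibSpec_pos (n - 2)
    omega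
termination_by n.toNat
decreasing_by omega

-- The memo dict only ever holds correct Fibonacci values.
def GoodDict (d : PySem.Dict Int Int) : Prop :=
  ∀ k v, d.get? k = some v → v = fibSpec k

theorem good_fibDict0 : GoodDict fibDict0 := by
  intro k v hk
  unfold fibDict0 at hk
  by_cases hk2 : k = 2
  · subst hk2
    rw [PySem.Dict.get?_insert_self, Option.some_inj] at hk
    rw [← hk, fibSpec]; norm_num
  · rw [PySem.Dict.get?_insert_of_ne _ _ hk2] at hk
    by_cases hk1 : k = 1
    · subst hk1
      rw [PySem.Dict.get?_insert_self, Option.some_inj] at hk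
      rw [← hk, fibSpec]; norm_num
    · rw [PySem.Dict.get?_insert_of_ne _ _ hk1] at hk
      simp [PySem.Dict.get?, PySem.Dict.empty] at hk

theorem fibAF_good : ∀ (fuel : Nat) (n : Int) (d : PySem.Dict Int Int), n.toNat ≤ fuel →
    GoodDict d → (fibAF fuel n d).1 = fibSpec n ∧ GoodDict (fibAF fuel n d).2 := by
  intro fuel
  induction fuel with
  | zero =>
    intro n d hN hd
    have h2 : n ≤ 2 := by omega
    rw [fibAF, fibSpec]
    simp [h2, hd]
  | succ N ih =>
    intro n d hN hd
    by_cases h2 : n ≤ 2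
    · rw [fibAF, fibSpec]; simp [h2, hd]
    · rw [fibAF]
      simp only [h2, if_false]
      cases hg : d.get? n with
      | some v =>
        exact ⟨by simpa using hd n v hg, by simpa [hg] using hd⟩
      | none =>
        simp only
        have hp1 := ih (n - 1) d (by omega) hd
        have hp2 := ih (n - 2) (fibAF N (n - 1) d).2 (by omega) hp1.2
        have hx : (fibAF N (n - 1) d).1 + (fibAF N (n - 2) (fibAF N (n - 1) d).2).1 = fibSpec n := by
          rw [hp1.1, hp2.1]
          conv_rhs => rw [fibSpec]
          simp [h2]
        constructor
        · simp only [PySem.Dict.getD, PySem.Dict.get?_insert_self, Option.getD_some]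
          exact hx
        · intro k v hk
          by_cases hkn : k = n
          · subst hkn
            rw [PySem.Dict.get?_insert_self, Option.some_inj] at hk
            rw [← hk, hx]
          · rw [PySem.Dict.get?_insert_of_ne _ _ hkn] at hk
            exact hp2.2 k v hk

theorem fibA_val (n : Int) (d : PySem.Dict Int Int) (hd : GoodDict d) :
    (fibA n d).1 = fibSpec n := (fibAF_good n.toNat n d le_rfl hd).1

theorem fibA_keep (n : Int) (d : PySem.Dict Int Int) (hd : GoodDict d) :
    GoodDict (fibA n d).2 := (fibAF_good n.toNat n d le_rfl hd).2

def idxSpec (m i : Int) : Int :=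
  if h : fibSpec i < m then idxSpec m (i + 1) else i
termination_by (m + 1 - i).toNat
decreasing_by
  have := fibSpec_ge i
  omega

def wlSpec (k i : Int) : Int :=
  if i ≤ 2 then i
  else if k ≤ fibSpec (i - 2) then wlSpec k (i - 2) else wlSpec (k - fibSpec (i - 2)) (i - 1)
termination_by i.toNat
decreasing_by all_goals omega

def fibTable (J : Nat) : List Int := (List.range J).map (fun t : Nat => fibSpec ((t : Int) + 1))

theorem fwlF_val : ∀ (fuel : Nat) (i k : Int) (d : PySem.Dict Int Int), i.toNat ≤ fuel →
    GoodDict d → (fwlF fuel k i d).1 = wlSpec k i := by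
  intro fuel
  induction fuel with
  | zero =>
    intro i k d hN hd
    have h2 : i ≤ 2 := by omega
    rw [fwlF, wlSpec]; simp [h2]
  | succ N ih =>
    intro i k d hN hd
    by_cases h2 : i ≤ 2
    · rw [fwlF, wlSpec]; simp [h2]
    · rw [fwlF, wlSpec]
      simp only [h2, if_false]
      rw [fibA_val (i - 2) d hd]
      by_cases hk : k ≤ fibSpec (i - 2)
      · simp only [hk, if_true]
        exact ih (i - 2) k _ (by omega) (fibA_keep _ _ hd)
      · simp only [hk, if_false]
        have hd2 := fibA_keep (i - 2) d hd
        rw [fibA_val (i - 2) _ hd2]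
        exact ih (i - 1) _ _ (by omega) (fibA_keep _ _ hd2)

theorem findIF_val : ∀ (fuel : Nat) (nv i : Int) (d : PySem.Dict Int Int), GoodDict d →
    (nv + 1 - i).toNat ≤ fuel →
    (findIF fuel nv i d).1 = idxSpec nv i ∧ GoodDict (findIF fuel nv i d).2 := by
  intro fuel
  induction fuel with
  | zero =>
    intro nv i d h hN
    have hge := fibSpec_ge i
    rw [findIF, idxSpec, dif_neg (by omega : ¬ fibSpec i < nv)]
    exact ⟨rfl, fibA_keep i d h⟩
  | succ N ih =>
    intro nv i d h hN
    by_cases hlt : (fibA i d).1 < nv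
    · have hlt' : fibSpec i < nv := by rw [← fibA_val i d h]; exact hlt
      rw [findIF, if_pos hlt, idxSpec, dif_pos hlt']
      have hge := fibSpec_ge i
      exact ih nv (i + 1) _ (fibA_keep i d h) (by omega)
    · have hlt' : ¬ fibSpec i < nv := by rw [← fibA_val i d h]; exact hlt
      rw [findIF, if_neg hlt, idxSpec, dif_neg hlt']
      exact ⟨rfl, fibA_keep i d h⟩

theorem idxSpec_ge (m i : Int) : i ≤ idxSpec m i := by
  rw [idxSpec]
  split
  · have := idxSpec_ge m (i + 1); omega
  · omega
termination_by (m + 1 - i).toNat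
decreasing_by
  have := fibSpec_ge i
  omega

theorem idxSpec_le (m : Int) (J : Nat) (hm : m ≤ fibSpec (J : Int)) :
    ∀ (i : Int), i ≤ (J : Int) → idxSpec m i ≤ (J : Int) := by
  intro i
  induction hN : ((J : Int) - i).toNat using Nat.strong_induction_on generalizing i with
  | _ N ihN =>
    intro hiJ
    rw [idxSpec]
    split
    · rename_i hlt
      have hne : i ≠ (J : Int) := by rintro rfl; omega
      exact ihN ((J : Int) - (i + 1)).toNat (by omega) (i + 1) rfl (by omega)
    · exact hiJ

theorem fibTable_len (J : Nat) : (fibTable J).length = J := by simp [fibTable]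

theorem fibTable_get (J t : Nat) (ht : t < J) :
    PySem.List.pyGetD (fibTable J) (t : Int) 0 = fibSpec ((t : Int) + 1) := by
  rw [PySem.List.pyGetD_natCast,
     List.getD_eq_getElem _ _ (by rw [fibTable_len]; exact ht)]
  simp [fibTable]

theorem descendBF_val (J : Nat) : ∀ (fuel : Nat) (i k : Int), i.toNat ≤ fuel →
    1 ≤ i → i ≤ (J : Int) → descendBF (fibTable J) fuel k i = wlSpec k i := by
  intro fuel
  induction fuel with
  | zero =>
    intro i k hN h1 hJ
    have h2 : i = 1 ∨ i = 2 := by omega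
    rw [descendBF, wlSpec, if_pos (by omega : i ≤ 2)]
  | succ N ih =>
    intro i k hN h1 hJ
    by_cases h2 : 2 < i
    · rw [descendBF, wlSpec]
      simp only [h2, if_pos, if_neg (by omega : ¬ i ≤ 2)]
      have ht : (i - 3).toNat < J := by omega
      have hcast : ((i - 3).toNat : Int) = i - 3 := by omega
      have hget : PySem.List.pyGetD (fibTable J) (i - 3) 0 = fibSpec (i - 2) := by
        rw [← hcast, fibTable_get J _ ht]
        congr 1
        omega
      rw [hget]
      by_cases hk : k ≤ fibSpec (i - 2)
      · simp only [hk, if_true]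
        exact ih (i - 2) k (by omega) (by omega) (by omega)
      · simp only [hk, if_false]
        exact ih (i - 1) _ (by omega) (by omega) (by omega)
    · rw [descendBF, wlSpec]
      simp only [h2, if_neg, not_false_iff, if_pos (by omega : i ≤ 2)]

theorem fib_rec_at (j : Nat) (hj : 2 ≤ j) :
    fibSpec ((j : Int) - 1) + fibSpec (j : Int) = fibSpec ((j : Int) + 1) := by
  conv_rhs => rw [fibSpec]
  rw [if_neg (by omega : ¬ (j : Int) + 1 ≤ 2)]
  have e1 : (j : Int) + 1 - 1 = (j : Int) := by ring
  have e2 : (j : Int) + 1 - 2 = (j : Int) - 1 := by ring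
  rw [e1, e2]
  ring

theorem fibTable_snoc (j : Nat) (hj : 2 ≤ j) :
    fibTable j ++ [fibSpec ((j : Int) - 1) + fibSpec (j : Int)] = fibTable (j + 1) := by
  rw [fib_rec_at j hj]
  simp [fibTable, List.range_succ]

theorem growBF_table (m : Int) : ∀ (fuel : Nat) (j : Nat) (x y : Int) (acc : List Int),
    2 ≤ j → 1 ≤ x → x = fibSpec ((j : Int) - 1) → y = fibSpec (j : Int) →
    acc = fibTable j → (m - y).toNat ≤ fuel →
    ∃ J : Nat, j ≤ J ∧ growBF fuel m x y acc = fibTable J ∧ m ≤ fibSpec (J : Int) := by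
  intro fuel
  induction fuel with
  | zero =>
    intro j x y acc hj hx hxe hye hacce hN
    rw [growBF]
    exact ⟨j, le_rfl, hacce, by omega⟩
  | succ N ih =>
    intro j x y acc hj hx hxe hye hacce hN
    rw [growBF]
    by_cases hlt : y < m
    · rw [if_pos hlt]
      have hc1 : ((j + 1 : Nat) : Int) = (j : Int) + 1 := by push_cast; ring
      have hc2 : ((j + 1 : Nat) : Int) - 1 = (j : Int) := by push_cast; ring
      have hrec := fib_rec_at j hj
      have hy1 := fibSpec_pos (j : Int)
      obtain ⟨J, hJ1, hJ2, hJ3⟩ := ih (j + 1) y (x + y) (acc ++ [x + y])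
        (by omega) (by omega)
        (by rw [hc2]; exact hye)
        (by rw [hc1, ← hrec, hxe, hye])
        (by rw [hacce, hxe, hye]; exact fibTable_snoc j hj)
        (by omega)
      exact ⟨J, by omega, hJ2, hJ3⟩
    · rw [if_neg hlt]
      exact ⟨j, le_rfl, hacce, by omega⟩

theorem scanB_val (m : Int) (J : Nat) (hm : m ≤ fibSpec (J : Int)) :
    ∀ (N : Nat) (i : Nat), J - i ≤ N → 1 ≤ i → i ≤ J →
    scanB m ((fibTable J).drop (i - 1)) (i : Int) = idxSpec m (i : Int) := by
  intro N
  induction N with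
  | zero =>
    intro i hN h1 hJ
    have hiJ : i = J := by omega
    subst hiJ
    have hlen : i - 1 < (fibTable i).length := by rw [fibTable_len]; omega
    rw [List.drop_eq_getElem_cons hlen]
    have hval : (fibTable i)[i - 1] = fibSpec (i : Int) := by
      simp only [fibTable, List.getElem_map, List.getElem_range]
      congr 1; omega
    rw [scanB, hval, idxSpec, if_neg (by omega : ¬ fibSpec (i : Int) < m),
       dif_neg (by omega : ¬ fibSpec (i : Int) < m)]
  | succ N ih =>
    intro i hN h1 hJ
    have hlen : i - 1 < (fibTable J).length := by rw [fibTable_len]; omega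
    rw [List.drop_eq_getElem_cons hlen]
    have hval : (fibTable J)[i - 1] = fibSpec (i : Int) := by
      simp only [fibTable, List.getElem_map, List.getElem_range]
      congr 1; omega
    rw [scanB, hval, idxSpec]
    by_cases hlt : fibSpec (i : Int) < m
    · have hne : i ≠ J := by rintro rfl; omega
      rw [if_pos hlt, dif_pos hlt]
      have hrec := ih (i + 1) (by omega) (by omega) (by omega)
      have hdrop : (i + 1) - 1 = (i - 1) + 1 := by omega
      rw [hdrop] at hrec
      have hcast : ((i : Int) + 1) = ((i + 1 : Nat) : Int) := by push_cast; ring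
      rw [hcast]
      exact hrec
    · rw [if_neg hlt, dif_neg hlt]

theorem len_a_100 : PySem.Str.len "1415926535897932384626433832795028841971693993751058209749445923078164062862089986280348253421170679" = (100 : Int) := by
  decide

-- The two final string selections agree once the selector values agree.
theorem pick_eq (s : String) (rem : Int) :
    (match PySem.Str.pyGet? s rem with | some c => String.ofList [c] | none => "")
      = ((PySem.Str.pyGet? s rem).map (fun c => String.ofList [c])).getD "" := by
  cases PySem.Str.pyGet? s rem <;> rfl

theorem dthDigit_eq (n : Int) : dthDigit n = dthDigit_alt n := by
  simp only [dthDigit, dthDigit_alt, len_a_100]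
  set m := PySem.Int.floordiv (n - 1) 100 + 1 with hm
  -- A side computes wlSpec m (idxSpec m 1)
  have hfi := findIF_val m.toNat m 1 fibDict0 good_fibDict0 (by omega)
  have hresA : (fwlF (findIF m.toNat m 1 fibDict0).1.toNat m (findIF m.toNat m 1 fibDict0).1
      (findIF m.toNat m 1 fibDict0).2).1 = wlSpec m (idxSpec m 1) := by
    rw [hfi.1]
    exact fwlF_val _ _ _ _ le_rfl hfi.2
  rw [hresA]
  -- B side: the grown list is a Fibonacci table
  have hf1 : (1 : Int) = fibSpec ((2 : Nat) - 1 : Int) := by rw [fibSpec]; norm_num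
  have hf2 : (1 : Int) = fibSpec ((2 : Nat) : Int) := by rw [fibSpec]; norm_num
  have htab2 : ([1, 1] : List Int) = fibTable 2 := by
    have : List.range 2 = [0, 1] := rfl
    simp only [fibTable, this, List.map]
    rw [show fibSpec ((0 : Nat) + 1 : Int) = 1 by rw [fibSpec]; norm_num,
        show fibSpec ((1 : Nat) + 1 : Int) = 1 by rw [fibSpec]; norm_num]
  obtain ⟨J, hJ2, hJeq, hJm⟩ := growBF_table m (m - 1).toNat 2 1 1 [1, 1]
    le_rfl (by omega) hf1 hf2 htab2 le_rfl
  rw [hJeq]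
  -- scan gives the smallest index, descent gives the word lookup
  have hscan : scanB m (fibTable J) 1 = idxSpec m 1 := by
    have := scanB_val m J hJm (J - 1) 1 (by omega) le_rfl (by omega)
    simpa using this
  rw [hscan]
  have hi1 := idxSpec_ge m 1
  have hiJ := idxSpec_le m J hJm 1 (by exact_mod_cast Nat.one_le_cast.mpr (by omega))
  have hdesc : descendBF (fibTable J) (idxSpec m 1).toNat m (idxSpec m 1) = wlSpec m (idxSpec m 1) :=
    descendBF_val J (idxSpec m 1).toNat _ m le_rfl hi1 hiJ
  rw [hdesc, pick_eq, pick_eq]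

-- ===== VERDICT (by name: the statement is the Claim_ definition above) =====
theorem dthDigit_spec : Claim_equal_dthDigit := by
  intro n _
  unfold Spec_dthDigit
  exact dthDigit_eq n
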